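-- pv_equiv track=rewrite | github.com/ansh5441/experiments | advent_of_code/2022/day_08/sol_1.py | get_right_max_heights
-- ===== SOURCE A (Python) =====
-- def get_right_max_heights(heights):
--   n = len(heights)
--   m = len(heights[0])
--   right_max_heights = [[-1 for i in range(m)] for j in range(n)]
--   for i in range(n):
--     for j in range(m-1, -1, -1):
--       if j == m - 1:
--         right_max_heights[i][j] = heights[i][j]
--       else:
--         right_max_heights[i][j] = (
--             max(right_max_heights[i][j + 1], heights[i][j]))
--   return right_max_heights
-- ===== SOURCE B (Python) =====
-- def get_right_max_heights(heights):
--   m = len(heights[0])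
--   return [[max(row[j:m]) for j in range(m)] for row in heights]
-- ===== Notes on version B (the rewrite author's own statement) =====
-- stated objective: simpler
-- what changed: Replaces the preallocated -1 grid and in-place running-max backward loop by a nested comprehension where each cell is computed independently as the max over the row slice row[j:m].
import Mathlib
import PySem

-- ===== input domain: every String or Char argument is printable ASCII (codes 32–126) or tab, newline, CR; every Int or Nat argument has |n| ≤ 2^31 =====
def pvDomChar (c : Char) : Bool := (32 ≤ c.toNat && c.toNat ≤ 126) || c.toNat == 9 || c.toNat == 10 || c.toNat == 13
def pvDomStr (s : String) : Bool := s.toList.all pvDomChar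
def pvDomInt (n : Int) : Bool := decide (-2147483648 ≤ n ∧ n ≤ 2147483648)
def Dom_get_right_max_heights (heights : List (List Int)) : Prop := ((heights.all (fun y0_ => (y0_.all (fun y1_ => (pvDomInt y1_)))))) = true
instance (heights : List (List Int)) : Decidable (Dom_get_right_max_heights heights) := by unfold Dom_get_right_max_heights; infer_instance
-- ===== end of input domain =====

-- B replaces A's preallocated -1 grid and in-place backward running-max loop by a nested
-- comprehension computing each cell independently as the max over the row slice row[j:m] (simpler, not faster).


-- ===== PORT A =====
-- loop body of A's inner backward loop over j (mutates right_max_heights at row i)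
def aInner (heights : List (List Int)) (m : Int) (rm : List (List Int)) (i : Int) : List (List Int) :=
  (PySem.List.pyRange (m - 1) (-1) (-1)).foldl (fun rm j =>
      let hij := PySem.List.pyGetD (PySem.List.pyGetD heights i []) j 0
      let v := if j = m - 1 then hij
               else max (PySem.List.pyGetD (rm.getD i.toNat []) (j + 1) 0) hij
      rm.set i.toNat ((rm.getD i.toNat []).set j.toNat v)) rm


def get_right_max_heights (heights : List (List Int)) : List (List Int) :=
  let n := heights.length
  let m : Int := (((PySem.List.pyGet? heights 0).getD []).length : Int)
  let right_max_heights :=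
    (PySem.List.pyRange 0 (n : Int) 1).map (fun _ =>
      (PySem.List.pyRange 0 m 1).map (fun _ => (-1 : Int)))
  (PySem.List.pyRange 0 (n : Int) 1).foldl (aInner heights m) right_max_heights

-- ===== PORT B =====
def get_right_max_heights_alt (heights : List (List Int)) : List (List Int) :=
  let m : Int := (((PySem.List.pyGet? heights 0).getD []).length : Int)
  heights.map (fun row =>
    (PySem.List.pyRange 0 m 1).map (fun j =>
      (PySem.List.max? (PySem.List.slice row (some j) (some m)) (fun y => y)).getD 0))

-- ===== PRECONDITION & SPEC =====
-- Pre_ excludes exactly the inputs on which Python A raises IndexError: the empty list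
-- (heights[0]) and grids having a row shorter than the first row (heights[i][j] out of range).
def Pre_get_right_max_heights (heights : List (List Int)) : Prop :=
  heights ≠ [] ∧ ∀ row ∈ heights, (heights.headD []).length ≤ row.length
instance (heights : List (List Int)) : Decidable (Pre_get_right_max_heights heights) := by
  unfold Pre_get_right_max_heights; infer_instance

def pvWitness_get_right_max_heights : List (List Int) := [[3, 0, 3, 7, 3], [2, 5, 5, 1, 2]]

def Spec_get_right_max_heights (heights : List (List Int)) (out : List (List Int)) : Prop := out = get_right_max_heights_alt heights
instance (heights : List (List Int)) (out : List (List Int)) : Decidable (Spec_get_right_max_heights heights out) := by unfold Spec_get_right_max_heights; infer_instance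

-- ===== CLAIM (what is proved, stated in full; the proofs are below) =====
def Claim_equal_get_right_max_heights : Prop := ∀ (heights : List (List Int)), Dom_get_right_max_heights heights → Pre_get_right_max_heights heights → Spec_get_right_max_heights heights (get_right_max_heights heights)

-- ===== LEMMAS AND PROOFS =====
-- ===== proof-side helpers =====

def rowStep (r : List Int) (m : Int) (cur : List Int) (j : Int) : List Int :=
  cur.set j.toNat (if j = m - 1 then PySem.List.pyGetD r j 0
                   else max (PySem.List.pyGetD cur (j + 1) 0) (PySem.List.pyGetD r j 0))

def sfx (r : List Int) (mN jN : Nat) : Int :=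
  (PySem.List.max? (PySem.List.slice r (some (jN : Int)) (some (mN : Int))) (fun y => y)).getD 0

theorem foldl_max_comm (t : List Int) : ∀ a x : Int, t.foldl max (max a x) = max a (t.foldl max x) := by
  induction t with
  | nil => intro a x; simp
  | cons y t ih =>
    intro a x
    simp only [List.foldl_cons]
    rw [max_assoc]
    exact ih a (max x y)

theorem sfx_eq (r : List Int) (mN jN : Nat) (hj : jN < mN) (hm : mN ≤ r.length) :
    sfx r mN jN = if jN = mN - 1 then r.getD jN 0
                  else max (sfx r mN (jN + 1)) (r.getD jN 0) := by
  have hjr : jN < r.length := by omega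
  have hdrop : r.drop jN = r[jN] :: r.drop (jN + 1) := List.drop_eq_getElem_cons hjr
  have hgetD : r.getD jN 0 = r[jN] := by
    rw [List.getD_eq_getElem?_getD, List.getElem?_eq_getElem hjr]; rfl
  by_cases hlast : jN = mN - 1
  · rw [if_pos hlast]
    have h1 : mN - jN = 1 := by omega
    unfold sfx
    rw [PySem.List.slice_natCast, hdrop, h1, List.take_succ_cons, List.take_zero,
      PySem.List.max?_id_cons, List.foldl_nil, Option.getD_some, hgetD]
  · rw [if_neg hlast]
    have hj2 : jN + 1 < mN := by omega
    have hjr2 : jN + 1 < r.length := by omega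
    have hdrop2 : r.drop (jN + 1) = r[jN + 1] :: r.drop (jN + 2) := List.drop_eq_getElem_cons hjr2
    have h1 : mN - jN = (mN - jN - 2) + 1 + 1 := by omega
    have h2 : mN - (jN + 1) = (mN - jN - 2) + 1 := by omega
    unfold sfx
    rw [PySem.List.slice_natCast, PySem.List.slice_natCast, hdrop, hdrop2, h1, h2,
      List.take_succ_cons, List.take_succ_cons, PySem.List.max?_id_cons,
      PySem.List.max?_id_cons, Option.getD_some, Option.getD_some, List.foldl_cons, hgetD,
      foldl_max_comm, max_comm]

theorem getD_set_self (l : List (List Int)) (i : Nat) (x : List Int) (h : i < l.length) :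
    (l.set i x).getD i [] = x := by
  rw [List.getD_eq_getElem?_getD, List.getElem?_set_self (by simpa using h)]
  rfl

theorem set_getD_self (l : List (List Int)) (i : Nat) (h : i < l.length) :
    l.set i (l.getD i []) = l := by
  have hx : l.getD i [] = l[i] := by
    rw [List.getD_eq_getElem?_getD, List.getElem?_eq_getElem h]; rfl
  rw [hx]
  exact List.set_getElem_self h

def rowFold (r : List Int) (m : Int) (k : Nat) (cur : List Int) : List Int :=
  (PySem.List.pyRange ((k : Int) - 1) (-1) (-1)).foldl (rowStep r m) cur

theorem rowFold_char (r : List Int) (mN : Nat) (hm : mN ≤ r.length) :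
    ∀ (k : Nat), k ≤ mN → ∀ cur : List Int, cur.length = mN →
      (∀ jN : Nat, k ≤ jN → jN < mN → cur[jN]? = some (sfx r mN jN)) →
      rowFold r (mN : Int) k cur = (List.range mN).map (sfx r mN) := by
  intro k
  induction k with
  | zero =>
    intro _ cur hlen hinv
    unfold rowFold
    rw [show ((0 : Nat) : Int) - 1 = -1 by norm_num,
      PySem.List.pyRange_neg_one_eq_nil le_rfl, List.foldl_nil]
    apply List.ext_getElem?
    intro i
    by_cases hi : i < mN
    · rw [hinv i (Nat.zero_le i) hi, List.getElem?_map, List.getElem?_range hi]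
      rfl
    · rw [List.getElem?_eq_none (by omega), List.getElem?_eq_none (by simp; omega)]
  | succ k ih =>
    intro hk cur hlen hinv
    unfold rowFold
    rw [show ((k + 1 : Nat) : Int) - 1 = (k : Int) by push_cast; ring,
      PySem.List.pyRange_neg_one_cons (by omega : (-1 : Int) < (k : Int)), List.foldl_cons]
    have hklt : k < mN := by omega
    have hres := ih (by omega) (rowStep r (mN : Int) cur (k : Int))
      (by simp [rowStep, List.length_set, hlen])
      (by
        intro jN hjk hjm
        simp only [rowStep, Int.toNat_natCast]
        by_cases hje : jN = k
        · subst hje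
          rw [List.getElem?_set_self (by omega)]
          congr 1
          rw [sfx_eq r mN jN hjm hm]
          by_cases hlast : jN = mN - 1
          · rw [if_pos hlast, if_pos (by omega : (jN : Int) = (mN : Int) - 1)]
            rw [PySem.List.pyGetD_of_nonneg _ _ (by omega)]
            simp
          · rw [if_neg hlast, if_neg (by omega : ¬ (jN : Int) = (mN : Int) - 1)]
            rw [PySem.List.pyGetD_of_nonneg _ _ (by omega)]
            rw [show ((jN : Int) + 1) = ((jN + 1 : Nat) : Int) by push_cast; ring,
              PySem.List.pyGetD_of_nonneg _ _ (by omega)]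
            simp only [Int.toNat_natCast]
            have := hinv (jN + 1) (by omega) (by omega)
            rw [List.getD_eq_getElem?_getD, this, List.getD_eq_getElem?_getD]
            rfl
        · rw [List.getElem?_set_ne (by omega)]
          exact hinv jN (by omega) hjm)
    unfold rowFold at hres
    exact hres

def initRow (mN : Nat) : List Int :=
  (PySem.List.pyRange 0 (mN : Int) 1).map (fun _ => (-1 : Int))

def aRow (r : List Int) (mN : Nat) : List Int :=
  (PySem.List.pyRange ((mN : Int) - 1) (-1) (-1)).foldl (rowStep r (mN : Int)) (initRow mN)

theorem fold2_general (r : List Int) (m : Int) (iN : Nat) :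
    ∀ (L : List Int) (rm : List (List Int)), iN < rm.length →
      L.foldl (fun rm j =>
          rm.set iN ((rm.getD iN []).set j.toNat
            (if j = m - 1 then PySem.List.pyGetD r j 0
             else max (PySem.List.pyGetD (rm.getD iN []) (j + 1) 0)
                      (PySem.List.pyGetD r j 0)))) rm
      = rm.set iN (L.foldl (rowStep r m) (rm.getD iN [])) := by
  intro L
  induction L with
  | nil =>
    intro rm h
    rw [List.foldl_nil, List.foldl_nil, set_getD_self rm iN h]
  | cons j L ih =>
    intro rm h
    rw [List.foldl_cons, List.foldl_cons,
      ih _ (by simpa using h), List.set_set,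
      getD_set_self rm iN _ h]
    rfl

theorem aInner_eq_set (heights : List (List Int)) (m : Int) (iN : Nat)
    (rm : List (List Int)) (h : iN < rm.length) :
    aInner heights m rm (iN : Int)
      = rm.set iN ((PySem.List.pyRange (m - 1) (-1) (-1)).foldl
          (rowStep (PySem.List.pyGetD heights (iN : Int) []) m) (rm.getD iN [])) := by
  exact fold2_general (PySem.List.pyGetD heights (iN : Int) []) m iN
    (PySem.List.pyRange (m - 1) (-1) (-1)) rm h

def F (heights : List (List Int)) (mN k : Nat) : List (List Int) :=
  (PySem.List.pyRange 0 (k : Int) 1).foldl (aInner heights (mN : Int))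
    (List.replicate heights.length (initRow mN))

theorem F_char (heights : List (List Int)) (mN : Nat) :
    ∀ (k : Nat), k ≤ heights.length →
      (F heights mN k).length = heights.length ∧
      ∀ iN : Nat, (F heights mN k)[iN]?
        = if iN < k then some (aRow (heights.getD iN []) mN)
          else (List.replicate heights.length (initRow mN))[iN]? := by
  intro k
  induction k with
  | zero =>
    intro _
    unfold F
    rw [PySem.List.pyRange_one_eq_nil (by norm_num), List.foldl_nil]
    refine ⟨List.length_replicate, ?_⟩
    intro iN
    rw [if_neg (by omega)]
  | succ k ih =>
    intro hk
    obtain ⟨hlen, hent⟩ := ih (by omega)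
    have hstep : F heights mN (k + 1) = aInner heights (mN : Int) (F heights mN k) (k : Int) := by
      unfold F
      rw [show ((k + 1 : Nat) : Int) = (k : Int) + 1 by push_cast; ring,
        PySem.List.pyRange_one_succ_right (by omega), List.foldl_append, List.foldl_cons,
        List.foldl_nil]
    have hklen : k < (F heights mN k).length := by omega
    have hset := aInner_eq_set heights (mN : Int) k (F heights mN k) hklen
    have hgd : (F heights mN k).getD k [] = initRow mN := by
      rw [List.getD_eq_getElem?_getD, hent k, if_neg (by omega),
        List.getElem?_replicate_of_lt (by omega)]
      rfl
    have hpg : PySem.List.pyGetD heights (k : Int) [] = heights.getD k [] := by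
      rw [PySem.List.pyGetD_of_nonneg _ _ (by omega), Int.toNat_natCast]
    rw [hgd, hpg] at hset
    rw [hstep, hset]
    refine ⟨by simpa using hlen, ?_⟩
    intro iN
    by_cases hie : iN = k
    · subst hie
      rw [List.getElem?_set_self (by omega), if_pos (by omega)]
      rfl
    · rw [List.getElem?_set_ne (by omega), hent iN]
      by_cases hilt : iN < k
      · rw [if_pos hilt, if_pos (by omega)]
      · rw [if_neg hilt, if_neg (by omega)]

theorem map_const_replicate (nn : Nat) (c : List Int) :
    (PySem.List.pyRange 0 (nn : Int) 1).map (fun _ => c) = List.replicate nn c := by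
  apply List.eq_replicate_iff.mpr
  constructor
  · rw [List.length_map, PySem.List.length_pyRange_one]
    simp
  · intro b hb
    rcases List.mem_map.mp hb with ⟨_, _, rfl⟩
    rfl

theorem A_eq_B (heights : List (List Int)) (hne : heights ≠ [])
    (hrows : ∀ row ∈ heights, (heights.headD []).length ≤ row.length) :
    get_right_max_heights heights = get_right_max_heights_alt heights := by
  cases heights with
  | nil => exact absurd rfl hne
  | cons h0 t =>
    have hm0 : (((PySem.List.pyGet? (h0 :: t) 0).getD []).length : Int) = (h0.length : Int) := by
      rw [PySem.List.pyGet?_zero_cons]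
      rfl
    have hA : get_right_max_heights (h0 :: t) = F (h0 :: t) h0.length (h0 :: t).length := by
      simp only [get_right_max_heights, F]
      rw [hm0, map_const_replicate (h0 :: t).length]
      rfl
    have hB : get_right_max_heights_alt (h0 :: t)
        = (h0 :: t).map (fun row => (List.range h0.length).map (sfx row h0.length)) := by
      unfold get_right_max_heights_alt
      rw [hm0]
      have hrow : ∀ row : List Int,
          (PySem.List.pyRange 0 (h0.length : Int) 1).map (fun j =>
            (PySem.List.max? (PySem.List.slice row (some j) (some (h0.length : Int)))
              (fun y => y)).getD 0)
          = (List.range h0.length).map (sfx row h0.length) := by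
        intro row
        rw [PySem.List.pyRange_zero_natCast, List.map_map]
        rfl
      simp only [hrow]
    rw [hA, hB]
    obtain ⟨hlen, hent⟩ := F_char (h0 :: t) h0.length (h0 :: t).length le_rfl
    apply List.ext_getElem?
    intro iN
    by_cases hi : iN < (h0 :: t).length
    · rw [hent iN, if_pos hi, List.getElem?_map, List.getElem?_eq_getElem hi]
      simp only [Option.map_some]
      congr 1
      have hgd : (h0 :: t).getD iN [] = (h0 :: t)[iN] := by
        rw [List.getD_eq_getElem?_getD, List.getElem?_eq_getElem hi]
        rfl
      rw [hgd]
      have hmle : h0.length ≤ (h0 :: t)[iN].length := hrows _ (List.getElem_mem hi)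
      have hchar := rowFold_char (h0 :: t)[iN] h0.length hmle h0.length le_rfl (initRow h0.length)
        (by simp [initRow, PySem.List.length_pyRange_one])
        (by intro jN hj1 hj2; omega)
      unfold rowFold at hchar
      unfold aRow
      exact hchar
    · have hrep : (List.replicate (h0 :: t).length (initRow h0.length))[iN]? = none :=
        List.getElem?_eq_none (by rw [List.length_replicate]; omega)
      rw [hent iN, if_neg hi, hrep, List.getElem?_eq_none (by rw [List.length_map]; omega)]

-- ===== VERDICT (by name: the statement is the Claim_ definition above) =====
theorem get_right_max_heights_spec : Claim_equal_get_right_max_heights := by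
  intro heights _ hpre
  unfold Spec_get_right_max_heights
  exact A_eq_B heights hpre.1 hpre.2
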